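-- pv_equiv track=rewrite | github.com/kamo104/PiTSZ | algorytmy/151751.py | calculate_lateness
-- ===== SOURCE A (Python) =====
-- def calculate_lateness(jobs, expected_finish_times, job_change_time_matrix, sequence):
--     calculated_lateness = 0
--     current_time = 0
--     for i in range(len(sequence)):
--         job_index = sequence[i] - 1
--         job_duration = jobs[job_index]
--         current_time += job_duration
--         expected_finish_time = expected_finish_times[job_index]
--         delay = min(job_duration, max(0, current_time - expected_finish_time))
--         calculated_lateness += delay
--
--         is_last = i == len(sequence) - 1
--         if not is_last:
--             next_job_index = sequence[i + 1] - 1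
--             current_time += job_change_time_matrix[job_index][next_job_index]
--
--     return calculated_lateness
-- ===== SOURCE B (Python) =====
-- def calculate_lateness(jobs, expected_finish_times, job_change_time_matrix, sequence):
--     # Closed form, no running state: the completion time of the k-th scheduled job
--     # is the sum of all durations up to and including it plus the sum of all
--     # changeovers between the adjacent pairs strictly before it (so no changeover
--     # ever follows the last job).
--     def completion(k):
--         return (sum(jobs[s - 1] for s in sequence[:k + 1])
--                 + sum(job_change_time_matrix[a - 1][b - 1]
--                       for a, b in zip(sequence[:k], sequence[1:k + 1])))
--     return sum(min(jobs[sequence[k] - 1],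
--                    max(0, completion(k) - expected_finish_times[sequence[k] - 1]))
--                for k in range(len(sequence)))
-- ===== Notes on version B (the rewrite author's own statement) =====
-- stated objective: alternative
-- what changed: B drops A's running clock and lateness accumulators entirely: for each position k it recomputes the k-th job's completion time from scratch as a closed-form slice sum (durations of sequence[:k+1] plus changeovers over zip(sequence[:k], sequence[1:k+1])) and sums the clamped lateness of all positions, a stateless O(n^2) brute force versus A's stateful O(n) single pass.
import Mathlib
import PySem

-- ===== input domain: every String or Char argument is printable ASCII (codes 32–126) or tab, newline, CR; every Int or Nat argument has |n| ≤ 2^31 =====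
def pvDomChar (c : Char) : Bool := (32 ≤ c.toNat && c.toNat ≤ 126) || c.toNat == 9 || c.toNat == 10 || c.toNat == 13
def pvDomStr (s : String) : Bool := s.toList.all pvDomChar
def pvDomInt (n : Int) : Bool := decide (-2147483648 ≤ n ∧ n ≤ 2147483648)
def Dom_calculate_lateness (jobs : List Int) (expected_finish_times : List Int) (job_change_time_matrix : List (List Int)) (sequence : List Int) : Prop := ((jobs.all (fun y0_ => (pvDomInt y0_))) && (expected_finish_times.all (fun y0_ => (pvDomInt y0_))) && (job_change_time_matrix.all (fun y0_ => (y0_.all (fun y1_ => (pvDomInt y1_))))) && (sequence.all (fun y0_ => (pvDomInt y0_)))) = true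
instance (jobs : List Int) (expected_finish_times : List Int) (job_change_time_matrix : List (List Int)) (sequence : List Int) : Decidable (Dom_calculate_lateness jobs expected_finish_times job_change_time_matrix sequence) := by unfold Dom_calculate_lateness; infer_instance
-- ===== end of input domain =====

-- B replaces A's running-state loop by a closed form: each job's completion time is
-- recomputed from slice sums, so B is O(n^2) where A is O(n) ('alternative', not faster).

-- ===== PORT A =====
-- A's single for-loop over indices, as the obvious recursion over the remaining
-- sequence; the look-ahead sequence[i+1] is the head of the remainder, and is_last is
-- the remainder being empty. State = (calculated_lateness, current_time), as in A.
def goA (jobs : List Int) (expected_finish_times : List Int)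
    (job_change_time_matrix : List (List Int)) :
    Int → Int → List Int → Int
  | lat, _, [] => lat
  | lat, current_time, s :: rest =>
    let job_index : Int := s - 1
    let job_duration := (PySem.List.pyGet? jobs job_index).getD 0
    let ct := current_time + job_duration
    let expected := (PySem.List.pyGet? expected_finish_times job_index).getD 0
    let delay := min job_duration (max 0 (ct - expected))
    let lat' := lat + delay
    match rest with
    | [] => lat'
    | s' :: _ =>
      goA jobs expected_finish_times job_change_time_matrix lat'
        (ct + (PySem.List.pyGet?
                ((PySem.List.pyGet? job_change_time_matrix job_index).getD []) (s' - 1)).getD 0)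
        rest

def calculate_lateness (jobs : List Int) (expected_finish_times : List Int) (job_change_time_matrix : List (List Int)) (sequence : List Int) : Int :=
  goA jobs expected_finish_times job_change_time_matrix 0 0 sequence

-- ===== PORT B =====
-- Source B's helpers: jobs[s-1] and job_change_time_matrix[a-1][b-1] (.getD 0 is total form;
-- Pre_ excludes the inputs where the Python raises IndexError, i.e. pyGet? = none).
def durB (jobs : List Int) (s : Int) : Int := (PySem.List.pyGet? jobs (s - 1)).getD 0
def chgB (m : List (List Int)) (a b : Int) : Int :=
  (PySem.List.pyGet? ((PySem.List.pyGet? m (a - 1)).getD []) (b - 1)).getD 0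

-- Source B's completion(k): sum over the slice sequence[:k+1] of durations plus sum over
-- zip(sequence[:k], sequence[1:k+1]) of changeovers.
def compB (jobs : List Int) (m : List (List Int)) (seq : List Int) (k : Nat) : Int :=
  ((PySem.List.slice seq none (some ((k : Int) + 1))).map (durB jobs)).sum
  + (((PySem.List.slice seq none (some (k : Int))).zip
        (PySem.List.slice seq (some 1) (some ((k : Int) + 1)))).map
       (fun p => chgB m p.1 p.2)).sum

def calculate_lateness_alt (jobs : List Int) (expected_finish_times : List Int) (job_change_time_matrix : List (List Int)) (sequence : List Int) : Int :=
  -- sum(min(jobs[sequence[k]-1], max(0, completion(k) - eft[sequence[k]-1])) for k in range(n))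
  ((List.range sequence.length).map (fun (k : Nat) =>
      let s := (PySem.List.pyGet? sequence (k : Int)).getD 0
      min (durB jobs s)
        (max 0 (compB jobs job_change_time_matrix sequence k
                  - (PySem.List.pyGet? expected_finish_times (s - 1)).getD 0)))).sum

-- ===== PRECONDITION & SPEC =====
-- Pre_ = exactly the inputs where Python A raises no IndexError: every referenced job
-- index is a valid Python index into jobs and expected_finish_times, and for each
-- adjacent pair the changeover matrix row and column exist.
def Pre_calculate_lateness (jobs : List Int) (expected_finish_times : List Int) (job_change_time_matrix : List (List Int)) (sequence : List Int) : Prop :=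
  (∀ s ∈ sequence, PySem.Raise.InRange jobs.length (s - 1) ∧
      PySem.Raise.InRange expected_finish_times.length (s - 1)) ∧
  (∀ p ∈ sequence.zip sequence.tail,
      PySem.Raise.InRange job_change_time_matrix.length (p.1 - 1) ∧
      PySem.Raise.InRange
        ((PySem.List.pyGet? job_change_time_matrix (p.1 - 1)).getD []).length (p.2 - 1))
instance (jobs : List Int) (expected_finish_times : List Int) (job_change_time_matrix : List (List Int)) (sequence : List Int) : Decidable (Pre_calculate_lateness jobs expected_finish_times job_change_time_matrix sequence) := by unfold Pre_calculate_lateness; infer_instance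

def pvWitness_calculate_lateness : List Int × List Int × List (List Int) × List Int :=
  ([2, 3], [1, 5], [[0, 1], [1, 0]], [1, 2])

def Spec_calculate_lateness (jobs : List Int) (expected_finish_times : List Int) (job_change_time_matrix : List (List Int)) (sequence : List Int) (out : Int) : Prop := out = calculate_lateness_alt jobs expected_finish_times job_change_time_matrix sequence
instance (jobs : List Int) (expected_finish_times : List Int) (job_change_time_matrix : List (List Int)) (sequence : List Int) (out : Int) : Decidable (Spec_calculate_lateness jobs expected_finish_times job_change_time_matrix sequence out) := by unfold Spec_calculate_lateness; infer_instance

-- ===== CLAIM (what is proved, stated in full; the proofs are below) =====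
def Claim_equal_calculate_lateness : Prop := ∀ (jobs : List Int) (expected_finish_times : List Int) (job_change_time_matrix : List (List Int)) (sequence : List Int), Dom_calculate_lateness jobs expected_finish_times job_change_time_matrix sequence → Pre_calculate_lateness jobs expected_finish_times job_change_time_matrix sequence → Spec_calculate_lateness jobs expected_finish_times job_change_time_matrix sequence (calculate_lateness jobs expected_finish_times job_change_time_matrix sequence)

-- ===== LEMMAS AND PROOFS =====

-- compB via take/drop (slice bridge lemmas on natural bounds).
theorem compB_eq_take (jobs : List Int) (m : List (List Int)) (seq : List Int) (k : Nat) :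
    compB jobs m seq k
      = ((seq.take (k + 1)).map (durB jobs)).sum
        + (((seq.take k).zip ((seq.drop 1).take k)).map (fun p => chgB m p.1 p.2)).sum := by
  unfold compB
  have h1 := PySem.List.slice_to_natCast seq (k + 1)
  have h2 := PySem.List.slice_to_natCast seq k
  have h3 := PySem.List.slice_natCast seq 1 (k + 1)
  push_cast at h1 h2 h3
  rw [h1, h2, h3]

-- Recurrence for compB on a cons with nonempty tail.
theorem compB_succ (jobs : List Int) (m : List (List Int)) (s s' : Int) (rest : List Int) (k : Nat) :
    compB jobs m (s :: s' :: rest) (k + 1)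
      = durB jobs s + chgB m s s' + compB jobs m (s' :: rest) k := by
  rw [compB_eq_take, compB_eq_take]
  simp [List.take_succ_cons]
  ring

theorem compB_zero_cons (jobs : List Int) (m : List (List Int)) (s : Int) (rest : List Int) :
    compB jobs m (s :: rest) 0 = durB jobs s := by
  rw [compB_eq_take]; simp

-- A's loop equals B's closed-form sum, for every starting accumulator and clock:
-- goA lat t seq = lat + Σ_{k < |seq|} min(dur, max 0 (t + compB seq k - eft)).
theorem goA_eq_sum (jobs eft : List Int) (m : List (List Int)) :
    ∀ (seq : List Int) (t lat : Int),
      goA jobs eft m lat t seq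
        = lat + ((List.range seq.length).map (fun (k : Nat) =>
            let s := (PySem.List.pyGet? seq (k : Int)).getD 0
            min (durB jobs s)
              (max 0 (t + compB jobs m seq k
                        - (PySem.List.pyGet? eft (s - 1)).getD 0)))).sum := by
  intro seq
  induction seq with
  | nil => intro t lat; simp [goA]
  | cons s rest ih =>
    intro t lat
    cases rest with
    | nil =>
      simp only [goA, List.length_cons, List.length_nil, Nat.zero_add, List.range_one,
        List.map_cons, List.map_nil, List.sum_cons, List.sum_nil, Nat.cast_zero]
      rw [compB_zero_cons]
      simp [durB, PySem.List.pyGet?, PySem.List.pyIdx?]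
    | cons s' rest' =>
      show goA jobs eft m (lat + _) (t + durB jobs s + chgB m s s') (s' :: rest') = _
      rw [ih]
      have hlen : (s :: s' :: rest').length = (s' :: rest').length + 1 := rfl
      rw [hlen, List.range_succ_eq_map]
      simp only [List.map_cons, List.map_map, List.sum_cons]
      have hpt : ∀ k : Nat,
          (PySem.List.pyGet? (s :: s' :: rest') ((k : Int) + 1)).getD 0
            = (PySem.List.pyGet? (s' :: rest') (k : Int)).getD 0 := by
        intro k
        have : ((k : Int) + 1) = ((k + 1 : Nat) : Int) := by push_cast; ring
        rw [this]
        simp [PySem.List.pyGet?_natCast]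
      have hterm : ∀ k : Nat,
          min (durB jobs ((PySem.List.pyGet? (s :: s' :: rest') ((Nat.succ k : Nat) : Int)).getD 0))
            (max 0 (t + compB jobs m (s :: s' :: rest') (Nat.succ k)
                      - (PySem.List.pyGet? eft ((PySem.List.pyGet? (s :: s' :: rest') ((Nat.succ k : Nat) : Int)).getD 0 - 1)).getD 0))
          = min (durB jobs ((PySem.List.pyGet? (s' :: rest') ((k : Nat) : Int)).getD 0))
              (max 0 (t + durB jobs s + chgB m s s' + compB jobs m (s' :: rest') k
                        - (PySem.List.pyGet? eft ((PySem.List.pyGet? (s' :: rest') ((k : Nat) : Int)).getD 0 - 1)).getD 0)) := by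
        intro k
        have hc : ((Nat.succ k : Nat) : Int) = (k : Int) + 1 := by push_cast; ring
        rw [hc, hpt k, show Nat.succ k = k + 1 from rfl, compB_succ]
        ring_nf
      have hmap :
          (List.map ((fun (k : Nat) =>
              min (durB jobs ((PySem.List.pyGet? (s :: s' :: rest') ((k : Nat) : Int)).getD 0))
                (max 0 (t + compB jobs m (s :: s' :: rest') k
                          - (PySem.List.pyGet? eft ((PySem.List.pyGet? (s :: s' :: rest') ((k : Nat) : Int)).getD 0 - 1)).getD 0))) ∘ Nat.succ)
            (List.range (s' :: rest').length))
          = List.map (fun (k : Nat) =>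
              min (durB jobs ((PySem.List.pyGet? (s' :: rest') ((k : Nat) : Int)).getD 0))
                (max 0 (t + durB jobs s + chgB m s s' + compB jobs m (s' :: rest') k
                          - (PySem.List.pyGet? eft ((PySem.List.pyGet? (s' :: rest') ((k : Nat) : Int)).getD 0 - 1)).getD 0)))
              (List.range (s' :: rest').length) :=
        List.map_congr_left (fun k _ => hterm k)
      rw [hmap, compB_zero_cons]
      have h0 : (PySem.List.pyGet? (s :: s' :: rest') ((0 : Nat) : Int)).getD 0 = s := by
        have hnn : (0 : Int) ≤ (rest'.length : Int) + 1 := by positivity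
        simp [PySem.List.pyGet?, PySem.List.pyIdx?, hnn]
      simp only [Nat.cast_zero] at h0 ⊢
      rw [h0]
      simp [durB]
      ring_nf

theorem calculate_lateness_eq_alt (jobs eft : List Int)
    (m : List (List Int)) (seq : List Int) :
    calculate_lateness jobs eft m seq = calculate_lateness_alt jobs eft m seq := by
  unfold calculate_lateness calculate_lateness_alt
  rw [goA_eq_sum]
  simp

-- ===== VERDICT (by name: the statement is the Claim_ definition above) =====
theorem calculate_lateness_spec : Claim_equal_calculate_lateness := by
  intro jobs eft m seq _ _
  unfold Spec_calculate_lateness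
  exact calculate_lateness_eq_alt jobs eft m seq
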